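-- pv_equiv track=rewrite | github.com/gyorilab/indra_gpt | indra_gpt/stmts_curation_stats.py | get_curation_tag
-- ===== SOURCE A (Python) =====
-- def get_curation_tag(curations_dict):
--         """Decide tag for a statement based on its curated evidence."""
--         if not curations_dict:
--             return "no_curation"
--         curations = list(curations_dict.values())
--         if any(c and c.get("tag") == "correct" for c in curations):
--             return "correct"
--         # Fall back to first available tag if no 'correct'
--         for curation in curations:
--             if curation and "tag" in curation:
--                 return curation["tag"]
--         return "unknown"
-- ===== SOURCE B (Python) =====
-- def get_curation_tag(curations_dict):
--     """Decide tag for a statement based on its curated evidence."""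
--     if not curations_dict:
--         return "no_curation"
--     found_correct = False
--     first_tag = None
--     have_first = False
--     for curation in curations_dict.values():
--         if curation:
--             if "tag" in curation and not have_first:
--                 first_tag = curation["tag"]
--                 have_first = True
--             if curation.get("tag") == "correct":
--                 found_correct = True
--     if found_correct:
--         return "correct"
--     if have_first:
--         return first_tag
--     return "unknown"
-- ===== Notes on version B (the rewrite author's own statement) =====
-- stated objective: alternative
-- what changed: Replaces A's two passes (any() generator plus a second fall-back loop with early return) by a single loop over the values maintaining a found_correct flag and the first available tag.
import Mathlib
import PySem

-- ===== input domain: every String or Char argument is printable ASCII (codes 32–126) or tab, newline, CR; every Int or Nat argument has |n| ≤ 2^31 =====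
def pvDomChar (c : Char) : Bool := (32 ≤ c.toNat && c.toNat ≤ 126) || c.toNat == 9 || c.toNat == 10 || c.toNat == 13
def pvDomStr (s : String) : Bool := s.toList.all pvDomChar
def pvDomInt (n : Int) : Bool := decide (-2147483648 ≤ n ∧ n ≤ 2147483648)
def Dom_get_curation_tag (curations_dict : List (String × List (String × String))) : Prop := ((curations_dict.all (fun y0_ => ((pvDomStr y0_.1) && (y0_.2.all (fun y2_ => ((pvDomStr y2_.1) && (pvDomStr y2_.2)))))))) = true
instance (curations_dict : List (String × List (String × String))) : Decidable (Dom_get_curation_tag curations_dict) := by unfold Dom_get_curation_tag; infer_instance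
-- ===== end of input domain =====

-- B replaces A's two passes (any() plus a fall-back loop) by a single loop that tracks a
-- found_correct flag and the first available tag; alternative decomposition, same cost.


-- ===== PORT A =====
-- fall-back loop: first curation that is truthy and has a "tag" key, else "unknown"
def pvAFind : List (List (String × String)) → String
  | [] => "unknown"
  | c :: rest =>
    if !c.isEmpty && (PySem.Dict.contains ⟨c⟩ "tag") then (PySem.Dict.get? ⟨c⟩ "tag").getD ""
    else pvAFind rest

def get_curation_tag (curations_dict : List (String × List (String × String))) : String :=
  if curations_dict.isEmpty then "no_curation"
  else
    let curations := curations_dict.map Prod.snd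
    if curations.any (fun c => !c.isEmpty && (PySem.Dict.get? ⟨c⟩ "tag" == some "correct")) then "correct"
    else pvAFind curations

-- ===== PORT B =====
-- single pass: state = (found_correct, first_tag as an Option encoding have_first/first_tag)
def pvBLoop : List (List (String × String)) → Bool → Option String → Bool × Option String
  | [], fc, ft => (fc, ft)
  | c :: rest, fc, ft =>
    if c.isEmpty then pvBLoop rest fc ft
    else
      let ft' := if ft.isNone && PySem.Dict.contains ⟨c⟩ "tag" then PySem.Dict.get? ⟨c⟩ "tag" else ft
      let fc' := fc || (PySem.Dict.get? ⟨c⟩ "tag" == some "correct")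
      pvBLoop rest fc' ft'

def get_curation_tag_alt (curations_dict : List (String × List (String × String))) : String :=
  if curations_dict.isEmpty then "no_curation"
  else
    let s := pvBLoop (curations_dict.map Prod.snd) false none
    if s.1 then "correct"
    else match s.2 with
      | some t => t
      | none => "unknown"

-- ===== PRECONDITION & SPEC =====
def Spec_get_curation_tag (curations_dict : List (String × List (String × String))) (out : String) : Prop := out = get_curation_tag_alt curations_dict
instance (curations_dict : List (String × List (String × String))) (out : String) : Decidable (Spec_get_curation_tag curations_dict out) := by unfold Spec_get_curation_tag; infer_instance

-- ===== CLAIM (what is proved, stated in full; the proofs are below) =====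
def Claim_equal_get_curation_tag : Prop := ∀ (curations_dict : List (String × List (String × String))), Dom_get_curation_tag curations_dict → Spec_get_curation_tag curations_dict (get_curation_tag curations_dict)

-- ===== LEMMAS AND PROOFS =====

-- membership of the "tag" key coincides with get? returning a value (dict values are Strings)
lemma pvContains_eq_isSome (c : List (String × String)) :
    (PySem.Dict.contains ⟨c⟩ "tag") = (PySem.Dict.get? (⟨c⟩ : PySem.Dict String String) "tag").isSome := by
  cases hg : PySem.Dict.get? (⟨c⟩ : PySem.Dict String String) "tag" with
  | none => simpa using (PySem.Dict.get?_eq_none_iff_contains (⟨c⟩ : PySem.Dict String String) "tag").mp hg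
  | some t =>
    by_cases hk : PySem.Dict.contains (⟨c⟩ : PySem.Dict String String) "tag" = true
    · simp [hk]
    · rw [Bool.not_eq_true] at hk
      have := (PySem.Dict.get?_eq_none_iff_contains (⟨c⟩ : PySem.Dict String String) "tag").mpr hk
      rw [this] at hg; cases hg

-- first tag as an Option, for relating the two sides
def pvFirstTag? : List (List (String × String)) → Option String
  | [] => none
  | c :: rest =>
    if !c.isEmpty && (PySem.Dict.contains ⟨c⟩ "tag") then PySem.Dict.get? ⟨c⟩ "tag"
    else pvFirstTag? rest

lemma pvBLoop_spec (vs : List (List (String × String))) (fc : Bool) (ft : Option String) :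
    pvBLoop vs fc ft =
      (fc || vs.any (fun c => !c.isEmpty && (PySem.Dict.get? ⟨c⟩ "tag" == some "correct")),
       if ft.isSome then ft else pvFirstTag? vs) := by
  induction vs generalizing fc ft with
  | nil => cases ft <;> simp [pvBLoop, pvFirstTag?]
  | cons c rest ih =>
    simp only [pvBLoop, pvFirstTag?, List.any_cons, pvContains_eq_isSome]
    generalize PySem.Dict.get? (⟨c⟩ : PySem.Dict String String) "tag" = g
    by_cases hc : c.isEmpty
    · rw [if_pos hc, ih]
      simp [hc]
    · rw [if_neg hc, ih]
      cases ft <;> cases g <;> simp [hc, Bool.or_assoc]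

lemma pvAFind_eq (vs : List (List (String × String))) :
    pvAFind vs = match pvFirstTag? vs with | some t => t | none => "unknown" := by
  induction vs with
  | nil => simp [pvAFind, pvFirstTag?]
  | cons c rest ih =>
    simp only [pvAFind, pvFirstTag?, pvContains_eq_isSome]
    generalize PySem.Dict.get? (⟨c⟩ : PySem.Dict String String) "tag" = g
    cases g <;> by_cases hc : c.isEmpty <;> simp [hc, ih]

-- ===== VERDICT (by name: the statement is the Claim_ definition above) =====
theorem get_curation_tag_spec : Claim_equal_get_curation_tag := by
  intro d _
  unfold Spec_get_curation_tag get_curation_tag get_curation_tag_alt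
  by_cases hd : d.isEmpty
  · simp [hd]
  · simp only [hd, Bool.false_eq_true, reduceIte, pvBLoop_spec, Bool.false_or,
      Option.isSome_none, pvAFind_eq]
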